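-- pv_equiv track=rewrite | github.com/Arniquin/Portfolio | IA Algorithms/HanoiTowers/Hanoi.py | heuristic_top_disks
-- ===== SOURCE A (Python) =====
-- def heuristic_top_disks(current_state, final_state, n):
--     """
--     Heuristic function to count disks on top of the final disks.
--
--     :param current_state: Current state of the Towers of Hanoi.
--     :param final_state: The desired final state.
--     :param n: Total number of disks.
--     :return: Estimated number of disks on top of the target disks.
--     """
--     total_top_disks = 0
--     for i in range(3):
--         if len(final_state[i]) != 0:
--             index = i  # Tower with disks in final state
--
--     for i in range(3):
--         if index != i:
--             for j in range(len(current_state[i])):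
--                 for x in range(j):
--                     total_top_disks += 1  # Count disks above the final disks
--     return total_top_disks
-- ===== SOURCE B (Python) =====
-- def heuristic_top_disks(current_state, final_state, n):
--     # Target tower = last of towers 0..2 nonempty in the final state, found by
--     # scanning (2, 1, 0) for the first nonempty one.
--     index = next(i for i in (2, 1, 0) if final_state[i])
--     # Disks above the bottom disk of a tower of length L number L*(L-1)//2.
--     return sum(len(current_state[i]) * (len(current_state[i]) - 1) // 2
--                for i in range(3) if i != index)
-- ===== Notes on version B (the rewrite author's own statement) =====
-- stated objective: simpler
-- what changed: A's nested per-disk counting loops are replaced by a sum of closed-form triangular numbers len*(len-1)//2 over the non-target towers, and the index-searching loop by a reversed-order first-match scan of (2,1,0).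
import Mathlib
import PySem

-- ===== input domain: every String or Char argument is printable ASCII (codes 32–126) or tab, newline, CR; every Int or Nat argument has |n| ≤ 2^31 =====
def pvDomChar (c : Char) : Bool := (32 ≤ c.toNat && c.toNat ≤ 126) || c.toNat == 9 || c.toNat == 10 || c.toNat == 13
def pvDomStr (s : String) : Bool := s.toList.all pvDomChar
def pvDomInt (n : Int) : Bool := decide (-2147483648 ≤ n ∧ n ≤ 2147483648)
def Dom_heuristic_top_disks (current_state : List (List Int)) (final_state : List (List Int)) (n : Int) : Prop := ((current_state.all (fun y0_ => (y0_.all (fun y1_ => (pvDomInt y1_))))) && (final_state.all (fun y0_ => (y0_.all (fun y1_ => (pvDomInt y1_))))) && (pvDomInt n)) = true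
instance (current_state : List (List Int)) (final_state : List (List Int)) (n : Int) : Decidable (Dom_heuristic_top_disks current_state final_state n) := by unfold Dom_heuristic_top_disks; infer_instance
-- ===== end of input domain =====

-- B replaces A's nested per-disk counting loops by a sum of closed-form triangular numbers
-- len*(len-1)//2 over the non-target towers (simpler; not measurably faster on the timed inputs).

-- ===== PORT A =====
def heuristic_top_disks (current_state : List (List Int)) (final_state : List (List Int)) (n : Int) : Int :=
  -- first loop: index := last i in 0..2 with final_state[i] nonempty; -1 stands for Python's
  -- still-unassigned variable (unreachable under Pre_, which demands a nonempty final tower)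
  let index : Int := (List.range 3).foldl
    (fun (idx : Int) (i : Nat) =>
      if ((PySem.List.pyGet? final_state (i : Int)).getD []).length ≠ 0 then (i : Int) else idx)
    (-1)
  -- second loop with the two nested counting loops, transliterated
  (List.range 3).foldl
    (fun (total : Int) (i : Nat) =>
      if index ≠ (i : Int) then
        (List.range ((PySem.List.pyGet? current_state (i : Int)).getD []).length).foldl
          (fun t j => (List.range j).foldl (fun t' _x => t' + 1) t) total
      else total)
    0

-- ===== PORT B =====
def heuristic_top_disks_alt (current_state : List (List Int)) (final_state : List (List Int)) (n : Int) : Int :=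
  -- index = next(i for i in (2, 1, 0) if final_state[i]); -1 stands for Python's
  -- StopIteration on an exhausted generator (unreachable under Pre_)
  let index : Int :=
    (([2, 1, 0] : List Int).find?
        (fun i => !((PySem.List.pyGet? final_state i).getD []).isEmpty)).getD (-1)
  -- sum(len(current_state[i]) * (len(current_state[i]) - 1) // 2 for i in range(3) if i != index)
  (((List.range 3).filter (fun (i : Nat) => (i : Int) ≠ index)).map
      (fun (i : Nat) =>
        PySem.Int.floordiv
          ((((PySem.List.pyGet? current_state (i : Int)).getD []).length : Int) *
            ((((PySem.List.pyGet? current_state (i : Int)).getD []).length : Int) - 1)) 2)).sum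

-- ===== PRECONDITION & SPEC =====
-- Exactly the inputs on which Python A returns: final_state has at least 3 towers, one of the
-- first three is nonempty, and current_state has every tower A's second loop indexes
-- (2 towers suffice when final tower 2 is nonempty, since that index is skipped; otherwise 3).
def Pre_heuristic_top_disks (current_state : List (List Int)) (final_state : List (List Int)) (n : Int) : Prop :=
  3 ≤ final_state.length ∧
    ((final_state.getD 2 [] ≠ [] ∧ 2 ≤ current_state.length) ∨
     (final_state.getD 2 [] = [] ∧ (final_state.getD 0 [] ≠ [] ∨ final_state.getD 1 [] ≠ []) ∧
      3 ≤ current_state.length))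
instance (current_state : List (List Int)) (final_state : List (List Int)) (n : Int) : Decidable (Pre_heuristic_top_disks current_state final_state n) := by unfold Pre_heuristic_top_disks; infer_instance

def pvWitness_heuristic_top_disks : List (List Int) × List (List Int) × Int :=
  ([[3, 2], [1], []], [[], [], [3, 2, 1]], 3)

def Spec_heuristic_top_disks (current_state : List (List Int)) (final_state : List (List Int)) (n : Int) (out : Int) : Prop := out = heuristic_top_disks_alt current_state final_state n
instance (current_state : List (List Int)) (final_state : List (List Int)) (n : Int) (out : Int) : Decidable (Spec_heuristic_top_disks current_state final_state n out) := by unfold Spec_heuristic_top_disks; infer_instance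

-- ===== CLAIM (what is proved, stated in full; the proofs are below) =====
def Claim_equal_heuristic_top_disks : Prop := ∀ (current_state : List (List Int)) (final_state : List (List Int)) (n : Int), Dom_heuristic_top_disks current_state final_state n → Pre_heuristic_top_disks current_state final_state n → Spec_heuristic_top_disks current_state final_state n (heuristic_top_disks current_state final_state n)

-- ===== LEMMAS AND PROOFS =====

-- sum 0 + 1 + … + (L-1)
def pvTri : Nat → Nat
  | 0 => 0
  | k + 1 => pvTri k + k

-- the tower index both programs compute: last i in 0..2 with final tower i nonempty, else -1
def pvIdx (f0 f1 f2 : List Int) : Int :=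
  if f2.length ≠ 0 then 2 else if f1.length ≠ 0 then 1 else if f0.length ≠ 0 then 0 else -1

-- A's innermost loop `for x in range(j): total += 1` adds j
theorem pv_inner_count (j : Nat) (t : Int) :
    (List.range j).foldl (fun t' _x => t' + 1) t = t + j := by
  induction j generalizing t with
  | zero => simp
  | succ k ih => simp [List.range_succ, ih]; omega

-- A's two nested loops over one tower of length L add pvTri L
theorem pv_tower_fold (L : Nat) (t : Int) :
    (List.range L).foldl (fun t j => (List.range j).foldl (fun t' _x => t' + 1) t) t
      = t + pvTri L := by
  induction L generalizing t with
  | zero => simp [pvTri]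
  | succ k ih =>
    rw [List.range_succ, List.foldl_append, ih]
    simp [pv_inner_count, pvTri]
    ring

-- B's closed form equals the triangular number
theorem pv_flo_eq (L : Nat) :
    PySem.Int.floordiv ((L : Int) * ((L : Int) - 1)) 2 = (pvTri L : Int) := by
  have h2 : (L : Int) * ((L : Int) - 1) = 2 * (pvTri L : Int) := by
    induction L with
    | zero => simp [pvTri]
    | succ k ih =>
      simp only [pvTri]
      push_cast
      push_cast at ih
      nlinarith [ih]
  rw [h2, PySem.Int.floordiv_eq_ediv_of_pos (by omega)]
  omega

set_option maxHeartbeats 1000000 in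
set_option maxRecDepth 4096 in
theorem pvA_eval3 (c0 c1 c2 : List Int) (cr : List (List Int)) (f0 f1 f2 : List Int)
    (fr : List (List Int)) (n : Int) :
    heuristic_top_disks (c0 :: c1 :: c2 :: cr) (f0 :: f1 :: f2 :: fr) n =
      (if pvIdx f0 f1 f2 ≠ 0 then (pvTri c0.length : Int) else 0) +
      (if pvIdx f0 f1 f2 ≠ 1 then (pvTri c1.length : Int) else 0) +
      (if pvIdx f0 f1 f2 ≠ 2 then (pvTri c2.length : Int) else 0) := by
  have gf0 : PySem.List.pyGet? (f0 :: f1 :: f2 :: fr) ((0 : Nat) : Int) = some f0 := by simp [pysem]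
  have gf1 : PySem.List.pyGet? (f0 :: f1 :: f2 :: fr) ((1 : Nat) : Int) = some f1 := by simp [pysem]
  have gf2 : PySem.List.pyGet? (f0 :: f1 :: f2 :: fr) ((2 : Nat) : Int) = some f2 := by simp [pysem]
  have gc0 : PySem.List.pyGet? (c0 :: c1 :: c2 :: cr) ((0 : Nat) : Int) = some c0 := by simp [pysem]
  have gc1 : PySem.List.pyGet? (c0 :: c1 :: c2 :: cr) ((1 : Nat) : Int) = some c1 := by simp [pysem]
  have gc2 : PySem.List.pyGet? (c0 :: c1 :: c2 :: cr) ((2 : Nat) : Int) = some c2 := by simp [pysem]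
  unfold heuristic_top_disks
  rw [show List.range 3 = [0, 1, 2] from rfl]
  simp only [List.foldl_cons, List.foldl_nil, gf0, gf1, gf2, gc0, gc1, gc2, Option.getD_some,
    pv_tower_fold, pvIdx]
  push_cast
  split_ifs <;> ring

set_option maxHeartbeats 1000000 in
set_option maxRecDepth 4096 in
theorem pvA_eval2 (c0 c1 : List Int) (f0 f1 f2 : List Int)
    (fr : List (List Int)) (n : Int) :
    heuristic_top_disks [c0, c1] (f0 :: f1 :: f2 :: fr) n =
      (if pvIdx f0 f1 f2 ≠ 0 then (pvTri c0.length : Int) else 0) +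
      (if pvIdx f0 f1 f2 ≠ 1 then (pvTri c1.length : Int) else 0) := by
  have gf0 : PySem.List.pyGet? (f0 :: f1 :: f2 :: fr) ((0 : Nat) : Int) = some f0 := by simp [pysem]
  have gf1 : PySem.List.pyGet? (f0 :: f1 :: f2 :: fr) ((1 : Nat) : Int) = some f1 := by simp [pysem]
  have gf2 : PySem.List.pyGet? (f0 :: f1 :: f2 :: fr) ((2 : Nat) : Int) = some f2 := by simp [pysem]
  have gc0 : PySem.List.pyGet? [c0, c1] ((0 : Nat) : Int) = some c0 := by simp [pysem]
  have gc1 : PySem.List.pyGet? [c0, c1] ((1 : Nat) : Int) = some c1 := by simp [pysem]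
  have gc2 : PySem.List.pyGet? [c0, c1] ((2 : Nat) : Int) = none := by
    simp [PySem.List.pyGet?, PySem.List.pyIdx?]
  unfold heuristic_top_disks
  rw [show List.range 3 = [0, 1, 2] from rfl]
  simp only [List.foldl_cons, List.foldl_nil, gf0, gf1, gf2, gc0, gc1, gc2, Option.getD_some,
    Option.getD_none, List.length_nil, List.range_zero, pv_tower_fold, pvIdx]
  push_cast [pvTri]
  split_ifs <;> ring

-- B's first-match scan of (2, 1, 0) finds the same index as A's last-match loop
set_option maxHeartbeats 1000000 in
theorem pvB_idx (f0 f1 f2 : List Int) (fr : List (List Int)) :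
    ((([2, 1, 0] : List Int).find?
        (fun i => !((PySem.List.pyGet? (f0 :: f1 :: f2 :: fr) i).getD []).isEmpty)).getD (-1))
      = pvIdx f0 f1 f2 := by
  have gf0 : PySem.List.pyGet? (f0 :: f1 :: f2 :: fr) (0 : Int) = some f0 := by simp [pysem]
  have gf1 : PySem.List.pyGet? (f0 :: f1 :: f2 :: fr) (1 : Int) = some f1 := by simp [pysem]
  have gf2 : PySem.List.pyGet? (f0 :: f1 :: f2 :: fr) (2 : Int) = some f2 := by simp [pysem]
  simp only [List.find?, gf0, gf1, gf2, Option.getD_some, pvIdx]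
  rcases f0 with _ | _ <;> rcases f1 with _ | _ <;> rcases f2 with _ | _ <;> simp

-- ediv form of the triangular closed form, as full simp leaves it
theorem pv_div_eq (L : Nat) :
    (L : Int) * ((L : Int) - 1) / 2 = (pvTri L : Int) := by
  have h := pv_flo_eq L
  rw [PySem.Int.floordiv_eq_ediv_of_pos (by omega)] at h
  exact h

set_option maxHeartbeats 1000000 in
theorem pvB_eval3 (c0 c1 c2 : List Int) (cr : List (List Int)) (f0 f1 f2 : List Int)
    (fr : List (List Int)) (n : Int) :
    heuristic_top_disks_alt (c0 :: c1 :: c2 :: cr) (f0 :: f1 :: f2 :: fr) n =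
      (if (0 : Int) ≠ pvIdx f0 f1 f2 then (pvTri c0.length : Int) else 0) +
      (if (1 : Int) ≠ pvIdx f0 f1 f2 then (pvTri c1.length : Int) else 0) +
      (if (2 : Int) ≠ pvIdx f0 f1 f2 then (pvTri c2.length : Int) else 0) := by
  have gc0 : PySem.List.pyGet? (c0 :: c1 :: c2 :: cr) ((0 : Nat) : Int) = some c0 := by simp [pysem]
  have gc1 : PySem.List.pyGet? (c0 :: c1 :: c2 :: cr) ((1 : Nat) : Int) = some c1 := by simp [pysem]
  have gc2 : PySem.List.pyGet? (c0 :: c1 :: c2 :: cr) ((2 : Nat) : Int) = some c2 := by simp [pysem]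
  unfold heuristic_top_disks_alt
  rw [pvB_idx]
  rw [show List.range 3 = [0, 1, 2] from rfl]
  simp only [List.filter_cons, List.filter_nil]
  by_cases h0 : (0 : Int) ≠ pvIdx f0 f1 f2 <;> by_cases h1 : (1 : Int) ≠ pvIdx f0 f1 f2 <;>
    by_cases h2 : (2 : Int) ≠ pvIdx f0 f1 f2 <;>
    simp [h0, h1, h2, gc0, gc1, gc2] <;> simp only [pv_div_eq] <;> ring

set_option maxHeartbeats 1000000 in
theorem pvB_eval2 (c0 c1 : List Int) (f0 f1 f2 : List Int)
    (fr : List (List Int)) (n : Int) :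
    heuristic_top_disks_alt [c0, c1] (f0 :: f1 :: f2 :: fr) n =
      (if (0 : Int) ≠ pvIdx f0 f1 f2 then (pvTri c0.length : Int) else 0) +
      (if (1 : Int) ≠ pvIdx f0 f1 f2 then (pvTri c1.length : Int) else 0) := by
  have gc0 : PySem.List.pyGet? [c0, c1] ((0 : Nat) : Int) = some c0 := by simp [pysem]
  have gc1 : PySem.List.pyGet? [c0, c1] ((1 : Nat) : Int) = some c1 := by simp [pysem]
  have gc2 : PySem.List.pyGet? [c0, c1] ((2 : Nat) : Int) = none := by
    simp [PySem.List.pyGet?, PySem.List.pyIdx?]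
  unfold heuristic_top_disks_alt
  rw [pvB_idx]
  rw [show List.range 3 = [0, 1, 2] from rfl]
  simp only [List.filter_cons, List.filter_nil]
  by_cases h0 : (0 : Int) ≠ pvIdx f0 f1 f2 <;> by_cases h1 : (1 : Int) ≠ pvIdx f0 f1 f2 <;>
    by_cases h2 : (2 : Int) ≠ pvIdx f0 f1 f2 <;>
    simp [h0, h1, h2, gc0, gc1, gc2, pvTri] <;> simp only [pv_div_eq] <;> ring

theorem heuristic_top_disks_spec : Claim_equal_heuristic_top_disks := by
  intro cs fs n _hdom hpre
  unfold Spec_heuristic_top_disks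
  obtain ⟨hlen, hcase⟩ := hpre
  rcases fs with _ | ⟨f0, _ | ⟨f1, _ | ⟨f2, fr⟩⟩⟩
  · simp at hlen
  · simp at hlen
  · simp at hlen
  rcases hcase with ⟨-, hcs⟩ | ⟨-, -, hcs⟩
  · rcases cs with _ | ⟨c0, _ | ⟨c1, cr⟩⟩
    · simp at hcs
    · simp at hcs
    rcases cr with _ | ⟨c2, cr'⟩
    · rw [pvA_eval2, pvB_eval2]; simp [ne_comm]
    · rw [pvA_eval3, pvB_eval3]; simp [ne_comm]
  · rcases cs with _ | ⟨c0, _ | ⟨c1, _ | ⟨c2, cr⟩⟩⟩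
    · simp at hcs
    · simp at hcs
    · simp at hcs
    rw [pvA_eval3, pvB_eval3]; simp [ne_comm]
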